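-- pv_equiv track=rewrite | github.com/sathish86/mb_embrace | embrace_app/recommendation.py | find_common_interest
-- ===== SOURCE A (Python) =====
-- def find_common_interest(input_list):
--     """
--     loop through the data to get (most to least) satisfaction result from the group members.
--     :param input_list: contains any of this likes, dislikes, requirement list of set.
--     :return: list : list of elements
--     """
--     result = None
--     while True:
--         # get intersection of all the list
--         result = set.intersection(*input_list)
--         if not result:
--             # eliminate one person from the list
--             input_list = input_list[0:-1]
--             if len(input_list) <= 1:
--                 result = set.intersection(*input_list)
--                 break
--         else:
--             break
--     return list(result)
-- ===== SOURCE B (Python) =====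
-- def find_common_interest(input_list):
--     cur = set(input_list[0])
--     for s in input_list[1:]:
--         nxt = cur & s
--         if not nxt:
--             break
--         cur = nxt
--     return list(cur)
-- ===== Notes on version B (the rewrite author's own statement) =====
-- stated objective: alternative
-- what changed: A repeatedly recomputes the full intersection of an ever-shorter prefix from scratch; B makes one forward pass of incremental intersections, stopping just before the running intersection would become empty (prefix intersections are monotone decreasing, so this is the longest nonempty one).
-- outside the precondition, e.g. on find_common_interest([]): A raises TypeError, B raises IndexError; on find_common_interest([set()]): A raises TypeError, B returns []
-- crash fix: On [set()] (a single empty set) A raises TypeError (set.intersection called with no arguments after the drop) while B returns []. — e.g. on find_common_interest([[]]): A raises TypeError, B returns []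
import Mathlib
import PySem

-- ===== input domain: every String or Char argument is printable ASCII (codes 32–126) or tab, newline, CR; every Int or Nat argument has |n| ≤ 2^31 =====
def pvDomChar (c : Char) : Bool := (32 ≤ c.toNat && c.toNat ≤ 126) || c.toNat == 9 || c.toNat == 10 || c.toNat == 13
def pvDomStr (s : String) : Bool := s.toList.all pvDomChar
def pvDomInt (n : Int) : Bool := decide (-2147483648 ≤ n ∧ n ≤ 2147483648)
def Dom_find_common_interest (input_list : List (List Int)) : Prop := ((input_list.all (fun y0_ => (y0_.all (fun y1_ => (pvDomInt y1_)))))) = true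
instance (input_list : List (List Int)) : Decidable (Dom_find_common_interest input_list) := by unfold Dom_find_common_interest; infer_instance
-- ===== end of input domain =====

-- B replaces A's repeated full re-intersection of ever-shorter prefixes by one forward pass of
-- incremental intersections with early exit (an alternative algorithm); equality of return values.

-- ===== PORT A =====
-- set.intersection(*l): none = TypeError when l is empty (Python raises there)
def pvInterAll (l : List (List Int)) : Option (PySem.Set Int) :=
  match l with
  | [] => none
  | s :: rest => some (rest.foldl (fun acc t => PySem.Set.inter acc (PySem.Set.ofList t)) (PySem.Set.ofList s))

-- A's 'while True' loop; input_list[0:-1] is List.dropLast (exact for every list).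
-- The 'none' branches are where the Python raises TypeError; Pre_ excludes them.
def pvLoopA (input_list : List (List Int)) : List Int :=
  match h : pvInterAll input_list with
  | none => []
  | some result =>
    if result ≠ [] then result
    else
      let rest := input_list.dropLast
      if rest.length ≤ 1 then (pvInterAll rest).getD []
      else pvLoopA rest
termination_by input_list.length
decreasing_by
  · have : input_list ≠ [] := by intro hn; subst hn; simp [pvInterAll] at h
    simpa [List.length_dropLast] using Nat.sub_lt (List.length_pos_iff.mpr this) one_pos

def find_common_interest (input_list : List (List Int)) : List Int :=
  pvLoopA input_list

-- ===== PORT B =====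
-- one forward pass: intersect until the intersection would become empty, then stop
def pvLoopB (cur : PySem.Set Int) (rest : List (List Int)) : List Int :=
  match rest with
  | [] => cur
  | s :: rest' =>
    let nxt := PySem.Set.inter cur (PySem.Set.ofList s)
    if nxt = [] then cur else pvLoopB nxt rest'

def find_common_interest_alt (input_list : List (List Int)) : List Int :=
  match input_list with
  | [] => []   -- Python B raises IndexError here; excluded by Pre_
  | s :: rest => pvLoopB (PySem.Set.ofList s) rest

-- ===== PRECONDITION & SPEC =====
-- A raises TypeError exactly on the empty list and on [set()] (after dropping to an empty
-- argument list); Pre_ excludes exactly those two raising inputs, nothing else.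
def Pre_find_common_interest (input_list : List (List Int)) : Prop :=
  input_list ≠ [] ∧ input_list ≠ [[]]
instance (input_list : List (List Int)) : Decidable (Pre_find_common_interest input_list) := by
  unfold Pre_find_common_interest; infer_instance

def pvWitness_find_common_interest : List (List Int) := [[1, 2], [2, 3]]

-- On [set()] A raises TypeError (set.intersection with no arguments) while B returns [].
def Raises_find_common_interest (input_list : List (List Int)) : Prop := input_list = [[]]
instance (input_list : List (List Int)) : Decidable (Raises_find_common_interest input_list) := by
  unfold Raises_find_common_interest; infer_instance
def pvRaiseWitness_find_common_interest : List (List Int) := [[]]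
def pvRaiseWitnessOut_find_common_interest : List Int := []

def Spec_find_common_interest (input_list : List (List Int)) (out : List Int) : Prop :=
  out = find_common_interest_alt input_list
instance (input_list : List (List Int)) (out : List Int) : Decidable (Spec_find_common_interest input_list out) := by
  unfold Spec_find_common_interest; infer_instance

-- ===== CLAIM (what is proved, stated in full; the proofs are below) =====
def Claim_equal_find_common_interest : Prop := ∀ (input_list : List (List Int)), Dom_find_common_interest input_list → Pre_find_common_interest input_list → Spec_find_common_interest input_list (find_common_interest input_list)

def Claim_raises_find_common_interest : Prop := (∀ (input_list : List (List Int)), Dom_find_common_interest input_list → Raises_find_common_interest input_list → ¬ Pre_find_common_interest input_list) ∧ (Dom_find_common_interest (pvRaiseWitness_find_common_interest) ∧ Raises_find_common_interest (pvRaiseWitness_find_common_interest) ∧ find_common_interest_alt (pvRaiseWitness_find_common_interest) = pvRaiseWitnessOut_find_common_interest)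

-- ===== LEMMAS AND PROOFS =====

theorem pvInter_nil (t : List Int) : PySem.Set.inter ([] : PySem.Set Int) (PySem.Set.ofList t) = [] := by
  simp [PySem.Set.inter]

theorem pvFold_nil (rest : List (List Int)) :
    rest.foldl (fun acc t => PySem.Set.inter acc (PySem.Set.ofList t)) ([] : PySem.Set Int) = [] := by
  induction rest with
  | nil => rfl
  | cons s rest ih => simpa [pvInter_nil] using ih

-- if the full incremental intersection is nonempty, B's early-exit loop computes it
theorem pvLoopB_of_ne (cur : PySem.Set Int) (rest : List (List Int))
    (h : rest.foldl (fun acc t => PySem.Set.inter acc (PySem.Set.ofList t)) cur ≠ []) :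
    pvLoopB cur rest = rest.foldl (fun acc t => PySem.Set.inter acc (PySem.Set.ofList t)) cur := by
  induction rest generalizing cur with
  | nil => rfl
  | cons s rest ih =>
    simp only [List.foldl_cons] at h ⊢
    have hne : PySem.Set.inter cur (PySem.Set.ofList s) ≠ [] := by
      intro he
      rw [he, pvFold_nil] at h
      exact h rfl
    simp only [pvLoopB, if_neg hne]
    exact ih _ h

-- if the full intersection is empty, the last list never matters to B's early-exit loop
theorem pvLoopB_dropLast (cur : PySem.Set Int) (rest : List (List Int))
    (h : rest.foldl (fun acc t => PySem.Set.inter acc (PySem.Set.ofList t)) cur = []) :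
    pvLoopB cur rest = pvLoopB cur rest.dropLast := by
  induction rest generalizing cur with
  | nil => rfl
  | cons s rest ih =>
    by_cases hn : PySem.Set.inter cur (PySem.Set.ofList s) = []
    · cases rest with
      | nil => simp [pvLoopB, hn]
      | cons t rest' => simp [pvLoopB, hn, List.dropLast]
    · cases rest with
      | nil =>
        simp only [List.foldl_cons, List.foldl_nil] at h
        exact absurd h hn
      | cons t rest' =>
        simp only [List.foldl_cons] at h
        simp only [show (s :: t :: rest').dropLast = s :: (t :: rest').dropLast from rfl]
        simp only [pvLoopB, if_neg hn]
        exact ih (PySem.Set.inter cur (PySem.Set.ofList s)) h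

theorem pvMain (input_list : List (List Int))
    (hp : Pre_find_common_interest input_list) :
    pvLoopA input_list = find_common_interest_alt input_list := by
  obtain ⟨hne, hone⟩ := hp
  obtain ⟨s, rest, rfl⟩ := List.exists_cons_of_ne_nil hne
  clear hne
  induction rest using List.reverseRecOn with
  | nil =>
    -- singleton [s], s ≠ [] since input ≠ [[]]
    have hs : s ≠ [] := by intro h; subst h; exact hone rfl
    have hso : PySem.Set.ofList s ≠ [] := by
      intro h
      cases s with
      | nil => exact hs rfl
      | cons a s' =>
        have : a ∈ PySem.Set.ofList (a :: s') := by
          rw [PySem.Set.mem_ofList]; exact List.mem_cons_self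
        rw [h] at this; exact absurd this (List.not_mem_nil)
    rw [pvLoopA]
    simp [pvInterAll, hso, find_common_interest_alt, pvLoopB]
  | append_singleton rest t ih =>
    rw [pvLoopA]
    simp only [pvInterAll]
    by_cases hr : (rest ++ [t]).foldl (fun acc u => PySem.Set.inter acc (PySem.Set.ofList u)) (PySem.Set.ofList s) = []
    · -- intersection empty: A drops the last list
      simp only [ite_not, if_pos hr]
      have hdl : (s :: (rest ++ [t])).dropLast = s :: rest := by
        rw [show s :: (rest ++ [t]) = (s :: rest) ++ [t] from rfl, List.dropLast_concat]
      rw [hdl]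
      by_cases hlen : (s :: rest).length ≤ 1
      · -- rest = []: A returns set(s); B agrees since the first intersection is empty
        have hrest : rest = [] := by
          cases rest with
          | nil => rfl
          | cons _ _ => simp at hlen
        subst hrest
        simp only [List.nil_append, List.foldl_cons, List.foldl_nil] at hr
        simp [find_common_interest_alt, pvLoopB, hr]
      · simp only [if_neg hlen]
        by_cases hone' : s :: rest = [[]]
        · -- then rest = [] contradicting hlen
          have : rest = [] := by
            cases rest with
            | nil => rfl
            | cons _ _ => simp at hone'
          subst this; simp at hlen
        · rw [ih hone']
          -- B on s :: (rest ++ [t]) = B on s :: rest when the full intersection is empty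
          simp only [find_common_interest_alt]
          rw [pvLoopB_dropLast (PySem.Set.ofList s) (rest ++ [t]) hr, List.dropLast_concat]
    · -- intersection nonempty: both return it
      simp only [ite_not, if_neg hr]
      simp only [find_common_interest_alt]
      rw [pvLoopB_of_ne _ _ hr]

-- ===== VERDICT (by name: the statement is the Claim_ definition above) =====
theorem find_common_interest_spec : Claim_equal_find_common_interest := by
  intro input_list _ hp
  unfold Spec_find_common_interest find_common_interest
  exact pvMain input_list hp

@[simp]
theorem find_common_interest_raises : Claim_raises_find_common_interest := by
  unfold Claim_raises_find_common_interest
  constructor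
  · intro l _ hr hp
    exact hp.2 hr
  · exact ⟨by decide, rfl, by decide⟩
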